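-- pv_equiv track=rewrite | github.com/w-a-s-d-q-w-e-r/COMP2090SEF-Group-Project-on-Data-Structure-and-Algorithm | tim_sort.py | gallop
-- ===== SOURCE A (Python) =====
-- def gallop(key, arr, start, end):
--     if start > end:
--         return start
--
--     if arr[start] > key:                                #If the first element is already greater than key, return start
--         return start
--
--     last = start
--     step = 1
--     pos = start
--     while pos <= end and arr[pos] <= key:
--         last = pos
--         pos = start + step
--         step *= 2
--
--     # Binary search in [last, min(pos, end)]
--     left = last
--     right = min(pos, end)
--     while left <= right:
--         mid = (left + right) // 2
--         if arr[mid] <= key: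
--             left = mid + 1
--         else:
--             right = mid - 1
--     return left
--
--     """ Create a random list and do code testing """
-- ===== SOURCE B (Python) =====
-- def gallop(key, arr, start, end):
--     if start > end:
--         return start
--     left, right = start, end
--     while left <= right:
--         mid = (left + right) // 2
--         if arr[mid] <= key:
--             left = mid + 1
--         else:
--             right = mid - 1
--     return left
-- ===== Notes on version B (the rewrite author's own statement) =====
-- stated objective: simpler
-- what changed: B drops A's exponential galloping bracket phase (and the arr[start] pre-check) and performs one plain upper-bound binary search over the whole inclusive range [start, end].
-- outside the precondition, e.g. on gallop(2, [1, 1, 1, 5, 1], 0, 4): A returns 5, B returns 3; on gallop(1, [5, 0, 0], -3, 2): A returns -3, B returns 3; on gallop(5, [1], 0, 5): A raises IndexError, B raises IndexError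
import Mathlib
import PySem

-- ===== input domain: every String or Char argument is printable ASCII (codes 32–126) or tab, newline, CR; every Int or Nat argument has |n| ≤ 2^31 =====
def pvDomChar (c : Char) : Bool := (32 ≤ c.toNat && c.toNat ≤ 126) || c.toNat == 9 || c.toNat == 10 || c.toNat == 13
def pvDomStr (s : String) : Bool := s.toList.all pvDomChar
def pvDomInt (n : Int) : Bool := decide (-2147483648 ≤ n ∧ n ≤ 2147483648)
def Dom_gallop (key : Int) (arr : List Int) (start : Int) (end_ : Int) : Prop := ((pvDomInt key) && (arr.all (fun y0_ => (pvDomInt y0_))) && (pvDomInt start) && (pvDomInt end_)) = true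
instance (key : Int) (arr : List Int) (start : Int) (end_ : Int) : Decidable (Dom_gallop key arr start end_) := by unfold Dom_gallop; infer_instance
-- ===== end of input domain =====

-- B replaces A's two-phase gallop-then-binary-search with a single upper-bound binary search over [start, end]; same O(log n) cost, simpler.


-- ===== PORT A =====
-- A's final binary search loop (left/right over the bracket found by the gallop phase)
def gallopBS (key : Int) (arr : List Int) (left right : Int) : Int :=
  if _h : left ≤ right then
    let mid := PySem.Int.floordiv (left + right) 2
    if PySem.List.pyGetD arr mid 0 ≤ key then gallopBS key arr (mid + 1) right
    else gallopBS key arr left (mid - 1)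
  else left
termination_by (right + 1 - left).toNat
decreasing_by
  · have := PySem.Int.floordiv_two_mid_bounds (lo := left) (hi := right) _h; omega
  · have := PySem.Int.floordiv_two_mid_bounds (lo := left) (hi := right) _h; omega

-- A's exponential gallop loop; state (last, step, pos); the hypothesis only carries
-- the loop invariant needed for termination (step ≥ 1, pos < start + step).
def gallopLoop (key : Int) (arr : List Int) (start end_ : Int)
    (last step pos : Int) (h : 1 ≤ step ∧ pos < start + step) : Int × Int :=
  if _hc : pos ≤ end_ ∧ PySem.List.pyGetD arr pos 0 ≤ key then
    gallopLoop key arr start end_ pos (step * 2) (start + step) ⟨by omega, by omega⟩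
  else (last, pos)
termination_by (end_ + 1 - pos).toNat
decreasing_by omega

def gallop (key : Int) (arr : List Int) (start : Int) (end_ : Int) : Int :=
  if start > end_ then start
  else if key < PySem.List.pyGetD arr start 0 then start
  else
    let lp := gallopLoop key arr start end_ start 1 start ⟨le_refl 1, by omega⟩
    gallopBS key arr lp.1 (min lp.2 end_)

-- ===== PORT B =====
-- single upper-bound binary search over [start, end_]
def ubLoop (key : Int) (arr : List Int) (left right : Int) : Int :=
  if _h : left ≤ right then
    let mid := PySem.Int.floordiv (left + right) 2
    if PySem.List.pyGetD arr mid 0 ≤ key then ubLoop key arr (mid + 1) right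
    else ubLoop key arr left (mid - 1)
  else left
termination_by (right + 1 - left).toNat
decreasing_by
  · have := PySem.Int.floordiv_two_mid_bounds (lo := left) (hi := right) _h; omega
  · have := PySem.Int.floordiv_two_mid_bounds (lo := left) (hi := right) _h; omega

def gallop_alt (key : Int) (arr : List Int) (start : Int) (end_ : Int) : Int :=
  if start > end_ then start
  else ubLoop key arr start end_

-- ===== PRECONDITION & SPEC =====
-- Pre_ excludes non-trivial ranges that are out of bounds or not sorted: galloping is only
-- specified on an in-bounds nondecreasing run (timsort); on unsorted or negative-index
-- (wrapping) ranges A's returned index is an artefact of its probe sequence, and an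
-- out-of-range end can make A raise IndexError.
def Pre_gallop (key : Int) (arr : List Int) (start : Int) (end_ : Int) : Prop :=
  start > end_ ∨
    (0 ≤ start ∧ end_ < (arr.length : Int) ∧
      List.Pairwise (· ≤ ·) ((arr.drop start.toNat).take (end_ + 1 - start).toNat))
instance (key : Int) (arr : List Int) (start : Int) (end_ : Int) : Decidable (Pre_gallop key arr start end_) := by unfold Pre_gallop; infer_instance

def pvWitness_gallop : Int × List Int × Int × Int := (4, [1, 3, 4, 4, 7], 1, 4)

def Spec_gallop (key : Int) (arr : List Int) (start : Int) (end_ : Int) (out : Int) : Prop := out = gallop_alt key arr start end_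
instance (key : Int) (arr : List Int) (start : Int) (end_ : Int) (out : Int) : Decidable (Spec_gallop key arr start end_ out) := by unfold Spec_gallop; infer_instance

-- ===== CLAIM (what is proved, stated in full; the proofs are below) =====
def Claim_equal_gallop : Prop := ∀ (key : Int) (arr : List Int) (start : Int) (end_ : Int), Dom_gallop key arr start end_ → Pre_gallop key arr start end_ → Spec_gallop key arr start end_ (gallop key arr start end_)

-- ===== LEMMAS AND PROOFS =====

-- r is the (unique) upper-bound insertion index for key in arr[start..end_]
def Good (key : Int) (arr : List Int) (start end_ r : Int) : Prop :=
  start ≤ r ∧ r ≤ end_ + 1 ∧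
  (∀ j, start ≤ j → j < r → PySem.List.pyGetD arr j 0 ≤ key) ∧
  (r ≤ end_ → key < PySem.List.pyGetD arr r 0)

theorem Good_unique {key : Int} {arr : List Int} {start end_ r1 r2 : Int}
    (h1 : Good key arr start end_ r1) (h2 : Good key arr start end_ r2) : r1 = r2 := by
  obtain ⟨a1, b1, c1, d1⟩ := h1
  obtain ⟨a2, b2, c2, d2⟩ := h2
  by_contra hne
  rcases lt_or_gt_of_ne hne with h | h
  · have := c2 r1 a1 h; have := d1 (by omega); omega
  · have := c1 r2 a2 h; have := d2 (by omega); omega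

-- generic correctness of the binary-search loop (B's loop) under a monotone slice
theorem ubLoop_good (key : Int) (arr : List Int) (start end_ : Int)
    (mono : ∀ i j : Int, start ≤ i → i ≤ j → j ≤ end_ → PySem.List.pyGetD arr i 0 ≤ PySem.List.pyGetD arr j 0) :
    ∀ l r : Int, start ≤ l → r ≤ end_ → l ≤ r + 1 →
      (∀ j, start ≤ j → j < l → PySem.List.pyGetD arr j 0 ≤ key) →
      (∀ j, r < j → j ≤ end_ → key < PySem.List.pyGetD arr j 0) →
      Good key arr start end_ (ubLoop key arr l r) := by
  intro l r
  induction l, r using ubLoop.induct key arr with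
  | case1 l r hle mid hmidle ih =>
    intro hsl hre hlr hlo hhi
    have hmb := PySem.Int.floordiv_two_mid_bounds (lo := l) (hi := r) hle
    rw [ubLoop, dif_pos hle, if_pos hmidle]
    exact ih (by omega) hre (by omega)
      (fun j hj1 hj2 => by
        by_cases hjl : j < l
        · exact hlo j hj1 hjl
        · exact le_trans (mono j mid hj1 (by omega) (by omega)) hmidle)
      hhi
  | case2 l r hle mid hmidgt ih =>
    intro hsl hre hlr hlo hhi
    have hmb := PySem.Int.floordiv_two_mid_bounds (lo := l) (hi := r) hle
    rw [ubLoop, dif_pos hle, if_neg hmidgt]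
    exact ih hsl (by omega) (by omega) hlo
      (fun j hj1 hj2 => by
        by_cases hjr : r < j
        · exact hhi j hjr hj2
        · exact lt_of_lt_of_le (lt_of_not_ge hmidgt) (mono mid j (by omega) (by omega) (by omega)))
  | case3 l r hgt =>
    intro hsl hre hlr hlo hhi
    rw [ubLoop, dif_neg hgt]
    exact ⟨hsl, by omega, hlo, fun hl => hhi l (by omega) hl⟩

-- A's binary-search loop is the same recursion as B's
theorem gallopBS_eq_ubLoop (key : Int) (arr : List Int) :
    ∀ l r : Int, gallopBS key arr l r = ubLoop key arr l r := by
  intro l r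
  induction l, r using gallopBS.induct key arr with
  | case1 l r hle mid hmidle ih => rw [gallopBS, ubLoop, dif_pos hle, dif_pos hle, if_pos hmidle, if_pos hmidle]; exact ih
  | case2 l r hle mid hmidgt ih => rw [gallopBS, ubLoop, dif_pos hle, dif_pos hle, if_neg hmidgt, if_neg hmidgt]; exact ih
  | case3 l r hgt => rw [gallopBS, ubLoop, dif_neg hgt, dif_neg hgt]

-- the gallop loop's exit state brackets the answer
theorem gallopLoop_spec (key : Int) (arr : List Int) (start end_ : Int) :
    ∀ (last step pos : Int) (h : 1 ≤ step ∧ pos < start + step),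
      start ≤ last → last ≤ end_ → last ≤ pos → PySem.List.pyGetD arr last 0 ≤ key →
      start ≤ (gallopLoop key arr start end_ last step pos h).1 ∧
      (gallopLoop key arr start end_ last step pos h).1 ≤ end_ ∧
      (gallopLoop key arr start end_ last step pos h).1 ≤ (gallopLoop key arr start end_ last step pos h).2 ∧
      PySem.List.pyGetD arr (gallopLoop key arr start end_ last step pos h).1 0 ≤ key ∧
      ((gallopLoop key arr start end_ last step pos h).2 ≤ end_ →
        key < PySem.List.pyGetD arr (gallopLoop key arr start end_ last step pos h).2 0) := by
  intro last step pos h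
  induction last, step, pos, h using gallopLoop.induct key arr start end_ with
  | case1 last step pos h hc ih =>
    intro h1 h2 h3 h4
    rw [gallopLoop, dif_pos hc]
    exact ih (by omega) hc.1 (by omega) hc.2
  | case2 last step pos h hc =>
    intro h1 h2 h3 h4
    rw [gallopLoop, dif_neg hc]
    dsimp only
    refine ⟨h1, h2, h3, h4, fun hpe => ?_⟩
    by_contra hk
    exact hc ⟨hpe, by omega⟩

-- sortedness of the slice gives pointwise monotonicity on [start, end_]
theorem mono_of_chain (arr : List Int) (start end_ : Int)
    (h0 : 0 ≤ start) (hlen : end_ < (arr.length : Int))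
    (hp : List.Pairwise (· ≤ ·) ((arr.drop start.toNat).take (end_ + 1 - start).toNat)) :
    ∀ i j : Int, start ≤ i → i ≤ j → j ≤ end_ → PySem.List.pyGetD arr i 0 ≤ PySem.List.pyGetD arr j 0 := by
  intro i j hi hij hj
  rcases eq_or_lt_of_le hij with rfl | hlt
  · exact le_refl _
  · have hilen : i < (arr.length : Int) := by omega
    have hjlen : j < (arr.length : Int) := by omega
    rw [PySem.List.pyGetD_eq_getElem arr 0 (by omega) hilen, PySem.List.pyGetD_eq_getElem arr 0 (by omega) hjlen]
    have ha : i.toNat - start.toNat < ((arr.drop start.toNat).take (end_ + 1 - start).toNat).length := by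
      simp [List.length_take, List.length_drop]; omega
    have hb : j.toNat - start.toNat < ((arr.drop start.toNat).take (end_ + 1 - start).toNat).length := by
      simp [List.length_take, List.length_drop]; omega
    have hab : i.toNat - start.toNat < j.toNat - start.toNat := by omega
    have := List.pairwise_iff_getElem.1 hp (i.toNat - start.toNat) (j.toNat - start.toNat) ha hb hab
    simpa [List.getElem_take, List.getElem_drop, Nat.add_sub_cancel' (by omega : start.toNat ≤ i.toNat),
      Nat.add_sub_cancel' (by omega : start.toNat ≤ j.toNat)] using this

-- ===== VERDICT (by name: the statement is the Claim_ definition above) =====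
theorem gallop_spec : Claim_equal_gallop := by
  intro key arr start end_ _hdom hpre
  unfold Spec_gallop gallop gallop_alt
  by_cases hse : start > end_
  · simp [hse]
  · simp only [hse, if_false]
    rcases hpre with h | ⟨h0, hlen, hch⟩
    · omega
    have mono := mono_of_chain arr start end_ h0 hlen hch
    have hub : Good key arr start end_ (ubLoop key arr start end_) :=
      ubLoop_good key arr start end_ mono start end_ (le_refl _) (le_refl _) (by omega)
        (fun j hj1 hj2 => by omega) (fun j hj1 hj2 => by omega)
    by_cases hk : key < PySem.List.pyGetD arr start 0
    · rw [if_pos hk]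
      refine Good_unique (key := key) (arr := arr) (start := start) (end_ := end_) ?_ hub
      exact ⟨le_refl _, by omega, fun j hj1 hj2 => by omega, fun _ => hk⟩
    · rw [if_neg hk]
      have hls := gallopLoop_spec key arr start end_ start 1 start ⟨le_refl 1, by omega⟩
        (le_refl _) (by omega) (le_refl _) (by omega)
      set lp := gallopLoop key arr start end_ start 1 start ⟨le_refl 1, by omega⟩ with hlp
      obtain ⟨q1, q2, q3, q4, q5⟩ := hls
      rw [gallopBS_eq_ubLoop]
      refine Good_unique (key := key) (arr := arr) (start := start) (end_ := end_) ?_ hub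
      refine ubLoop_good key arr start end_ mono lp.1 (min lp.2 end_) q1 (by omega) (by omega)
        (fun j hj1 hj2 => le_trans (mono j lp.1 hj1 (by omega) (by omega)) q4)
        (fun j hj1 hj2 => ?_)
      have hple : lp.2 ≤ end_ := by omega
      exact lt_of_lt_of_le (q5 hple) (mono lp.2 j (by omega) (by omega) hj2)
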